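-- pv_equiv track=rewrite | github.com/codecravings/Scientific-Calculator-using-Python | Scientific Calculator.py | _format_expression
-- ===== SOURCE A (Python) =====
-- def _format_expression(expr):
--     """Make the raw expression more readable."""
--     replacements = [
--         ('**', '^'), ('pi', '\u03c0'), ('sqrt', '\u221a'),
--         ('*', '\u00d7'), ('/', '\u00f7'),
--     ]
--     display = expr
--     for old, new in replacements:
--         display = display.replace(old, new)
--     return display
-- ===== SOURCE B (Python) =====
-- def _format_expression(expr):
--     """Make the raw expression more readable."""
--     table = [
--         ('**', '^'), ('sqrt', '\u221a'), ('pi', '\u03c0'),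
--         ('*', '\u00d7'), ('/', '\u00f7'),
--     ]
--     out = []
--     i = 0
--     n = len(expr)
--     while i < n:
--         for old, new in table:
--             if expr.startswith(old, i):
--                 out.append(new)
--                 i += len(old)
--                 break
--         else:
--             out.append(expr[i])
--             i += 1
--     return ''.join(out)
-- ===== Notes on version B (the rewrite author's own statement) =====
-- stated objective: alternative
-- what changed: Replaces the five sequential full-string .replace() passes by a single left-to-right scan that at each position tries the tokens longest-first ('**' before '*') and emits the symbol or the character.
import Mathlib
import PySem

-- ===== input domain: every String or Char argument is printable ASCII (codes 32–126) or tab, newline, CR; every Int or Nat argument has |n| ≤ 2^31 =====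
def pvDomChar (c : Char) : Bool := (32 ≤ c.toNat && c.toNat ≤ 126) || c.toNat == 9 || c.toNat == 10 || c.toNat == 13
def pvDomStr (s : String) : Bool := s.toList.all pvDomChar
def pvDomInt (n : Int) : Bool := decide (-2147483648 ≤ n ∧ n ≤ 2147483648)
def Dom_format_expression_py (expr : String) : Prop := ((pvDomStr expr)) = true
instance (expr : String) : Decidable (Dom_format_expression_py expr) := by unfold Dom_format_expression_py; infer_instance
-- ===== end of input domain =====

-- B replaces A's five sequential full-string .replace passes by one left-to-right scan that
-- tries the tokens longest-first at each position (objective: alternative decomposition, one pass).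

-- ===== PORT A =====
-- A: display = expr; for (old, new) in replacements: display = display.replace(old, new)
def format_expression_py (expr : String) : String :=
  List.foldl (fun display (p : String × String) => PySem.Str.replace display p.1 p.2)
    expr
    [("**", "^"), ("pi", "π"), ("sqrt", "√"), ("*", "×"), ("/", "÷")]

-- ===== PORT B =====
-- B's while-loop over positions: at each position try the table tokens in order
-- ('**', 'sqrt', 'pi', '*', '/'); on a match emit the symbol and skip the token,
-- otherwise emit the character.  Hand-ported step for step (exact: the inner
-- `for … break/else` is this if-chain, `expr.startswith(tok, i)` is `isPrefixOf` on the tail).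
def fmtScanB : List Char → List Char
  | [] => []
  | c :: t =>
    if ['*', '*'].isPrefixOf (c :: t) then '^' :: fmtScanB (t.drop 1)
    else if ['s', 'q', 'r', 't'].isPrefixOf (c :: t) then '√' :: fmtScanB (t.drop 3)
    else if ['p', 'i'].isPrefixOf (c :: t) then 'π' :: fmtScanB (t.drop 1)
    else if c = '*' then '×' :: fmtScanB t
    else if c = '/' then '÷' :: fmtScanB t
    else c :: fmtScanB t
termination_by l => l.length
decreasing_by all_goals (simp [List.length_drop]; try omega)

def format_expression_py_alt (expr : String) : String :=
  String.ofList (fmtScanB expr.toList)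

-- ===== PRECONDITION & SPEC =====
def Spec_format_expression_py (expr : String) (out : String) : Prop := out = format_expression_py_alt expr
instance (expr : String) (out : String) : Decidable (Spec_format_expression_py expr out) := by unfold Spec_format_expression_py; infer_instance

-- ===== CLAIM (what is proved, stated in full; the proofs are below) =====
def Claim_equal_format_expression_py : Prop := ∀ (expr : String), Dom_format_expression_py expr → Spec_format_expression_py expr (format_expression_py expr)

-- ===== LEMMAS AND PROOFS =====

-- Structural characterisation of PySem.Chars.replace for a nonempty pattern.
def pvRepTok (old new : List Char) : List Char → List Char
  | [] => []
  | c :: t =>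
    if old.isPrefixOf (c :: t) then new ++ pvRepTok old new (t.drop (old.length - 1))
    else c :: pvRepTok old new t
termination_by l => l.length
decreasing_by all_goals (simp [List.length_drop]; try omega)

lemma pvGo_eq (old new : List Char) (ho : old ≠ []) :
    ∀ (fuel : Nat) (l acc : List Char), l.length ≤ fuel →
      PySem.Chars.replace.go old new fuel l acc = acc.reverse ++ pvRepTok old new l := by
  intro fuel
  induction fuel with
  | zero =>
      intro l acc hl
      have : l = [] := List.eq_nil_of_length_eq_zero (Nat.le_zero.mp hl)
      subst this
      simp [PySem.Chars.replace.go, pvRepTok]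
  | succ n ih =>
      intro l acc hl
      cases l with
      | nil => simp [PySem.Chars.replace.go, pvRepTok]
      | cons c t =>
          by_cases hp : old.isPrefixOf (c :: t)
          · have hdrop : List.drop old.length (c :: t) = t.drop (old.length - 1) := by
              obtain ⟨o, os, rfl⟩ : ∃ o os, old = o :: os := by
                cases old with
                | nil => exact absurd rfl ho
                | cons o os => exact ⟨o, os, rfl⟩
              simp
            rw [show PySem.Chars.replace.go old new (n+1) (c :: t) acc =
                  PySem.Chars.replace.go old new n (List.drop old.length (c :: t)) (new.reverse ++ acc) from by
                simp [PySem.Chars.replace.go, hp]]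
            rw [hdrop, ih _ _ (by simp at hl ⊢; omega)]
            rw [show pvRepTok old new (c :: t) = new ++ pvRepTok old new (t.drop (old.length - 1)) from by
                simp [pvRepTok, hp]]
            simp
          · rw [show PySem.Chars.replace.go old new (n+1) (c :: t) acc =
                  PySem.Chars.replace.go old new n t (c :: acc) from by
                simp [PySem.Chars.replace.go, hp]]
            rw [ih _ _ (by simp at hl ⊢; omega)]
            rw [show pvRepTok old new (c :: t) = c :: pvRepTok old new t from by
                simp [pvRepTok, hp]]
            simp

lemma pvReplace_eq (s old new : List Char) (ho : old ≠ []) :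
    PySem.Chars.replace s old new = pvRepTok old new s := by
  rw [PySem.Chars.replace]
  rw [if_neg (by simpa [List.isEmpty_iff] using ho)]
  simpa using pvGo_eq old new ho s.length s [] le_rfl

-- skip step: a char that cannot start the pattern passes through unchanged
lemma pvRepTok_cons_ne {o : Char} (os new : List Char) {c : Char} (t : List Char)
    (h : o ≠ c) : pvRepTok (o :: os) new (c :: t) = c :: pvRepTok (o :: os) new t := by
  rw [pvRepTok, if_neg (by simp [List.isPrefixOf, h])]

lemma pvRepTok_cons_not_prefix (old new : List Char) {c : Char} (t : List Char)
    (h : ¬ old.isPrefixOf (c :: t)) :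
    pvRepTok old new (c :: t) = c :: pvRepTok old new t := by
  rw [pvRepTok, if_neg h]

-- a prefix made of chars foreign to both pattern and replacement survives pvRepTok
lemma pvPrefix_repTok (old new : List Char) (ho : old ≠ []) (hn : new ≠ []) :
    ∀ (l w : List Char), (∀ a ∈ w, a ∉ old ∧ a ∉ new) →
      w.isPrefixOf (pvRepTok old new l) = w.isPrefixOf l := by
  intro l
  induction l with
  | nil => intro w hw; simp [pvRepTok]
  | cons c t ih =>
      intro w hw
      by_cases hp : old.isPrefixOf (c :: t)
      · rw [pvRepTok, if_pos hp]
        cases w with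
        | nil => simp
        | cons a w' =>
            obtain ⟨o, os, rfl⟩ : ∃ o os, old = o :: os := by
              cases old with
              | nil => exact absurd rfl ho
              | cons o os => exact ⟨o, os, rfl⟩
            obtain ⟨nn, ns, rfl⟩ : ∃ nn ns, new = nn :: ns := by
              cases new with
              | nil => exact absurd rfl hn
              | cons nn ns => exact ⟨nn, ns, rfl⟩
            have hoc : o = c := by
              simp [List.isPrefixOf] at hp; exact hp.1
            have ha := hw a (by simp)
            have h1 : a ≠ nn := by intro h; exact ha.2 (by simp [h])
            have h2 : a ≠ c := by intro h; exact ha.1 (by simp [hoc ▸ h])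
            simp only [List.cons_append, List.isPrefixOf]
            rw [show (a == nn) = false from beq_eq_false_iff_ne.mpr h1,
              show (a == c) = false from beq_eq_false_iff_ne.mpr h2]
            simp
      · rw [pvRepTok_cons_not_prefix _ _ _ hp]
        cases w with
        | nil => simp
        | cons a w' =>
            have := ih w' (fun a ha => hw a (by simp [ha]))
            simp [List.isPrefixOf, this]

-- abbreviations for the five passes (proof-local)
def pvChain (l : List Char) : List Char :=
  pvRepTok ['/'] ['÷'] (pvRepTok ['*'] ['×'] (pvRepTok ['s','q','r','t'] ['√']
    (pvRepTok ['p','i'] ['π'] (pvRepTok ['*','*'] ['^'] l))))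

lemma pvRepTok_star (Y : List Char) :
    pvRepTok ['*'] ['×'] ('*' :: Y) = '×' :: pvRepTok ['*'] ['×'] Y := by
  rw [pvRepTok, if_pos (by simp [List.isPrefixOf])]; simp

lemma pvRepTok_slash (Y : List Char) :
    pvRepTok ['/'] ['÷'] ('/' :: Y) = '÷' :: pvRepTok ['/'] ['÷'] Y := by
  rw [pvRepTok, if_pos (by simp [List.isPrefixOf])]; simp

lemma pvChain_eq_scan : ∀ (n : Nat) (l : List Char), l.length ≤ n → pvChain l = fmtScanB l := by
  intro n
  induction n with
  | zero =>
      intro l hl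
      have : l = [] := List.eq_nil_of_length_eq_zero (Nat.le_zero.mp hl)
      subst this
      simp [pvChain, pvRepTok, fmtScanB]
  | succ n ih =>
      intro l hl
      cases l with
      | nil => simp [pvChain, pvRepTok, fmtScanB]
      | cons c t =>
        by_cases h1 : ['*','*'].isPrefixOf (c :: t)
        · obtain ⟨rfl, t', rfl⟩ : c = '*' ∧ ∃ t', t = '*' :: t' := by
            cases t with
            | nil => simp [List.isPrefixOf] at h1
            | cons d t' =>
                simp [List.isPrefixOf] at h1
                exact ⟨h1.1.symm, t', by rw [← h1.2]⟩
          simp at hl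
          simp [pvChain, pvRepTok, List.isPrefixOf, fmtScanB]
          simpa [pvChain] using ih t' (by omega)
        · by_cases h2 : ['s','q','r','t'].isPrefixOf (c :: t)
          · obtain ⟨rfl, t', rfl⟩ : c = 's' ∧ ∃ t', t = 'q' :: 'r' :: 't' :: t' := by
              cases t with
              | nil => simp [List.isPrefixOf] at h2
              | cons d t2 =>
                cases t2 with
                | nil => simp [List.isPrefixOf] at h2
                | cons e t3 =>
                  cases t3 with
                  | nil => simp [List.isPrefixOf] at h2
                  | cons f t' =>
                    simp [List.isPrefixOf] at h2
                    exact ⟨h2.1.symm, t', by rw [← h2.2.1, ← h2.2.2.1, ← h2.2.2.2]⟩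
            simp at hl
            simp [pvChain, pvRepTok, List.isPrefixOf, fmtScanB]
            simpa [pvChain] using ih t' (by omega)
          · by_cases h3 : ['p','i'].isPrefixOf (c :: t)
            · obtain ⟨rfl, t', rfl⟩ : c = 'p' ∧ ∃ t', t = 'i' :: t' := by
                cases t with
                | nil => simp [List.isPrefixOf] at h3
                | cons d t' =>
                    simp [List.isPrefixOf] at h3
                    exact ⟨h3.1.symm, t', by rw [← h3.2]⟩
              simp at hl
              simp [pvChain, pvRepTok, List.isPrefixOf, fmtScanB]
              simpa [pvChain] using ih t' (by omega)
            · by_cases h4 : c = '*'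
              · subst h4
                simp at hl
                rw [pvChain, pvRepTok_cons_not_prefix _ _ _ h1,
                  pvRepTok_cons_ne (o := 'p') (c := '*') _ _ _ (by decide),
                  pvRepTok_cons_ne (o := 's') (c := '*') _ _ _ (by decide),
                  pvRepTok_star,
                  pvRepTok_cons_ne (o := '/') (c := '×') _ _ _ (by decide)]
                rw [fmtScanB, if_neg h1, if_neg h2, if_neg h3, if_pos rfl]
                have := ih t (by omega)
                rw [pvChain] at this
                rw [this]
              · by_cases h5 : c = '/'
                · subst h5
                  simp at hl
                  rw [pvChain,
                    pvRepTok_cons_ne (o := '*') (c := '/') (os := ['*']) _ _ (by decide),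
                    pvRepTok_cons_ne (o := 'p') (c := '/') _ _ _ (by decide),
                    pvRepTok_cons_ne (o := 's') (c := '/') _ _ _ (by decide),
                    pvRepTok_cons_ne (o := '*') (c := '/') (os := []) _ _ (by decide),
                    pvRepTok_slash]
                  rw [fmtScanB, if_neg h1, if_neg h2, if_neg h3, if_neg h4, if_pos rfl]
                  have := ih t (by omega)
                  rw [pvChain] at this
                  rw [this]
                · -- generic character: every pass lets it through
                  simp at hl
                  have hstep1 : pvRepTok ['*','*'] ['^'] (c :: t) = c :: pvRepTok ['*','*'] ['^'] t :=
                    pvRepTok_cons_ne _ _ _ (Ne.symm h4)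
                  have hstep2 : pvRepTok ['p','i'] ['π'] (c :: pvRepTok ['*','*'] ['^'] t)
                      = c :: pvRepTok ['p','i'] ['π'] (pvRepTok ['*','*'] ['^'] t) := by
                    by_cases hcp : c = 'p'
                    · subst hcp
                      apply pvRepTok_cons_not_prefix
                      intro h
                      apply h3
                      have e1 := pvPrefix_repTok ['*','*'] ['^'] (by simp) (by simp) t ['i'] (by simp)
                      simp only [List.isPrefixOf, beq_self_eq_true, Bool.true_and] at h ⊢
                      rw [e1] at h
                      exact h
                    · exact pvRepTok_cons_ne _ _ _ (fun h => hcp h.symm)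
                  have hstep3 : pvRepTok ['s','q','r','t'] ['√']
                        (c :: pvRepTok ['p','i'] ['π'] (pvRepTok ['*','*'] ['^'] t))
                      = c :: pvRepTok ['s','q','r','t'] ['√']
                        (pvRepTok ['p','i'] ['π'] (pvRepTok ['*','*'] ['^'] t)) := by
                    by_cases hcs : c = 's'
                    · subst hcs
                      apply pvRepTok_cons_not_prefix
                      intro h
                      apply h2
                      have e2 := pvPrefix_repTok ['p','i'] ['π'] (by simp) (by simp)
                        (pvRepTok ['*','*'] ['^'] t) ['q','r','t'] (by simp)
                      have e1 := pvPrefix_repTok ['*','*'] ['^'] (by simp) (by simp) t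
                        ['q','r','t'] (by simp)
                      simp only [List.isPrefixOf, beq_self_eq_true, Bool.true_and] at h ⊢
                      rw [e2, e1] at h
                      exact h
                    · exact pvRepTok_cons_ne _ _ _ (fun h => hcs h.symm)
                  rw [pvChain, hstep1, hstep2, hstep3,
                    pvRepTok_cons_ne (o := '*') (os := []) _ _ (Ne.symm h4),
                    pvRepTok_cons_ne (o := '/') _ _ _ (Ne.symm h5)]
                  rw [fmtScanB, if_neg h1, if_neg h2, if_neg h3, if_neg h4, if_neg h5]
                  have := ih t (by omega)
                  rw [pvChain] at this
                  rw [this]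

lemma pvFormats_eq (expr : String) : format_expression_py expr = format_expression_py_alt expr := by
  have hA : (format_expression_py expr).toList = pvChain expr.toList := by
    simp only [format_expression_py, List.foldl, PySem.Str.toList_replace]
    rw [show ("**" : String).toList = ['*','*'] from rfl, show ("^" : String).toList = ['^'] from rfl,
        show ("pi" : String).toList = ['p','i'] from rfl, show ("π" : String).toList = ['π'] from rfl,
        show ("sqrt" : String).toList = ['s','q','r','t'] from rfl, show ("√" : String).toList = ['√'] from rfl,
        show ("*" : String).toList = ['*'] from rfl, show ("×" : String).toList = ['×'] from rfl,
        show ("/" : String).toList = ['/'] from rfl, show ("÷" : String).toList = ['÷'] from rfl]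
    rw [pvReplace_eq _ _ _ (by decide), pvReplace_eq _ _ _ (by decide),
        pvReplace_eq _ _ _ (by decide), pvReplace_eq _ _ _ (by decide),
        pvReplace_eq _ _ _ (by decide)]
    rfl
  apply String.toList_inj.mp
  rw [hA, pvChain_eq_scan expr.toList.length expr.toList le_rfl]
  simp [format_expression_py_alt]

-- ===== VERDICT (by name: the statement is the Claim_ definition above) =====
theorem format_expression_py_spec : Claim_equal_format_expression_py := by
  intro expr _
  unfold Spec_format_expression_py
  exact pvFormats_eq expr
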